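-- pv_equiv track=rewrite | github.com/GrainedCube2214/Advent-Of-Code-2025 | Day 3/solution.py | most_joltage_pt2
-- ===== SOURCE A (Python) =====
-- def most_joltage_pt2(bank, k):
--     stack = []
--     to_remove = len(bank) - k  # how many we are allowed to drop
--
--     for digit in bank:
--         # while we can remove AND the stack top is smaller than current digit
--         while to_remove > 0 and stack and stack[-1] < digit:
--             stack.pop()
--             to_remove -= 1
--
--         stack.append(digit)
--
--     # if still too long (didn't remove enough), truncate from end
--     return stack[:k]
-- ===== SOURCE B (Python) =====
-- def first_argmax(xs):
--     best = 0
--     for j in range(1, len(xs)):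
--         if xs[j] > xs[best]:
--             best = j
--     return best
--
-- def most_joltage_pt2(bank, k):
--     rest = list(bank)
--     if k >= len(rest):
--         return rest
--     out = []
--     while k > 0:
--         i = first_argmax(rest[:len(rest) - k + 1])
--         out.append(rest[i])
--         rest = rest[i + 1:]
--         k -= 1
--     return out
-- ===== Notes on version B (the rewrite author's own statement) =====
-- stated objective: alternative
-- what changed: Replaces the single-pass bounded greedy stack (push/pop with a removal budget, then truncate) by position-by-position selection: for each of the k output slots scan the feasible window for the leftmost maximum and advance a cursor past it.
-- outside the precondition, e.g. on most_joltage_pt2([2, 1], -1): A returns [2], B returns []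
import Mathlib
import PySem

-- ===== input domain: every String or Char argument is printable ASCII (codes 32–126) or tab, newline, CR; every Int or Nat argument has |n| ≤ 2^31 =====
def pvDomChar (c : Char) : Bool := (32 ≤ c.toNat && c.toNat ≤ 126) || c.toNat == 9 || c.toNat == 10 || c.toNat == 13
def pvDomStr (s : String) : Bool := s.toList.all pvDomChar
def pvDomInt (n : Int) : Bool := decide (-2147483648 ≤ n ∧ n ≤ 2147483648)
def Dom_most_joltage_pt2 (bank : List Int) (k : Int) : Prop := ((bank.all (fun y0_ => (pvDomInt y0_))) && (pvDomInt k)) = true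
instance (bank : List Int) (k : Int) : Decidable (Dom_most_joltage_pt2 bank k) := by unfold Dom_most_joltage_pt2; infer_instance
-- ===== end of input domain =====

-- B replaces A's budgeted greedy stack by per-slot window-maximum selection (alternative
-- decomposition, not faster); equal on all inputs with 0 ≤ k.

-- ===== PORT A =====
-- Python's `while to_remove > 0 and stack and stack[-1] < digit: stack.pop(); to_remove -= 1`.
-- The stack is stored top-first (Python appends/pops at the END of the list); the final
-- stack is therefore reversed before the slice.
def pvPopPhase (st : List Int) (r d : Int) : List Int × Int :=
  match st with
  | [] => ([], r)
  | t :: rest => if r > 0 ∧ t < d then pvPopPhase rest (r - 1) d else (t :: rest, r)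

-- one iteration of `for digit in bank`
def pvStep (p : List Int × Int) (d : Int) : List Int × Int :=
  let q := pvPopPhase p.1 p.2 d
  (d :: q.1, q.2)

def most_joltage_pt2 (bank : List Int) (k : Int) : List Int :=
  let res := bank.foldl pvStep ([], (bank.length : Int) - k)
  PySem.List.slice res.1.reverse none (some k)   -- stack[:k]

-- ===== PORT B =====
-- `first_argmax`: forward scan keeping the leftmost strictly greatest element's index
def pvFirstArgmax (xs : List Int) : Int :=
  (PySem.List.pyRange 1 (xs.length : Int) 1).foldl
    (fun best j => if PySem.List.pyGetD xs j 0 > PySem.List.pyGetD xs best 0 then j else best) 0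

-- the `while k > 0` loop of B, as recursion on k
def pvSelGo (rest : List Int) (k : Int) : List Int :=
  if h : 0 < k then
    let i := pvFirstArgmax (PySem.List.slice rest none (some ((rest.length : Int) - k + 1)))
    -- rest[i] (in range whenever this loop is reached from the guarded entry point)
    PySem.List.pyGetD rest i 0 :: pvSelGo (PySem.List.slice rest (some (i + 1)) none) (k - 1)
  else []
termination_by k.toNat
decreasing_by omega

def most_joltage_pt2_alt (bank : List Int) (k : Int) : List Int :=
  if (bank.length : Int) ≤ k then bank else pvSelGo bank k

-- ===== PRECONDITION & SPEC =====
-- Pre_ excludes negative k: k counts how many batteries to KEEP, so a negative k is outside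
-- the natural domain; there A's value (a negative Python slice of the fully-reduced stack)
-- is an accident of its implementation, while B naturally returns [].
def Pre_most_joltage_pt2 (bank : List Int) (k : Int) : Prop := 0 ≤ k
instance (bank : List Int) (k : Int) : Decidable (Pre_most_joltage_pt2 bank k) := by
  unfold Pre_most_joltage_pt2; infer_instance

def pvWitness_most_joltage_pt2 : List Int × Int := ([3, 1, 4, 1, 5, 9, 2, 6], 4)

def Spec_most_joltage_pt2 (bank : List Int) (k : Int) (out : List Int) : Prop := out = most_joltage_pt2_alt bank k
instance (bank : List Int) (k : Int) (out : List Int) : Decidable (Spec_most_joltage_pt2 bank k out) := by unfold Spec_most_joltage_pt2; infer_instance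

-- ===== CLAIM (what is proved, stated in full; the proofs are below) =====
def Claim_equal_most_joltage_pt2 : Prop := ∀ (bank : List Int) (k : Int), Dom_most_joltage_pt2 bank k → Pre_most_joltage_pt2 bank k → Spec_most_joltage_pt2 bank k (most_joltage_pt2 bank k)

-- ===== LEMMAS AND PROOFS =====

-- pvPopPhase: budget bookkeeping, no-budget case, membership, full drain, bottom preservation
theorem pvPop_budget (st : List Int) (r d : Int) :
    (pvPopPhase st r d).2 = r - (st.length : Int) + ((pvPopPhase st r d).1.length : Int) := by
  induction st generalizing r with
  | nil => simp [pvPopPhase]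
  | cons t rest ih =>
    by_cases h : r > 0 ∧ t < d
    · simp only [pvPopPhase, if_pos h]
      have := ih (r - 1)
      simp only [List.length_cons]
      push_cast
      omega
    · simp [pvPopPhase, if_neg h]

theorem pvPop_mem (st : List Int) (r d : Int) :
    ∀ y ∈ (pvPopPhase st r d).1, y ∈ st := by
  induction st generalizing r with
  | nil => simp [pvPopPhase]
  | cons t rest ih =>
    by_cases h : r > 0 ∧ t < d
    · intro y hy
      simp only [pvPopPhase, if_pos h] at hy
      exact List.mem_cons_of_mem _ (ih (r - 1) y hy)
    · simp [pvPopPhase, if_neg h]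

theorem pvPop_nopop (st : List Int) {r : Int} (d : Int) (h : r ≤ 0) :
    pvPopPhase st r d = (st, r) := by
  cases st with
  | nil => simp [pvPopPhase]
  | cons t rest =>
    have : ¬(r > 0 ∧ t < d) := by omega
    simp [pvPopPhase, this]

theorem pvPop_drain (st : List Int) (r d : Int) (hall : ∀ y ∈ st, y < d)
    (hr : (st.length : Int) ≤ r) :
    pvPopPhase st r d = ([], r - st.length) := by
  induction st generalizing r with
  | nil => simp [pvPopPhase]
  | cons t rest ih =>
    have ht : t < d := hall t (by simp)
    have hpos : r > 0 ∧ t < d := by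
      refine ⟨?_, ht⟩
      simp only [List.length_cons] at hr
      omega
    simp only [pvPopPhase, if_pos hpos]
    rw [ih (r - 1) (fun y hy => hall y (List.mem_cons_of_mem _ hy))
        (by simp at hr; omega)]
    simp only [List.length_cons]
    congr 1
    push_cast
    ring

theorem pvPop_bottom (s : List Int) (b r d : Int) (h : b < d → r ≤ (s.length : Int)) :
    pvPopPhase (s ++ [b]) r d = ((pvPopPhase s r d).1 ++ [b], (pvPopPhase s r d).2) := by
  induction s generalizing r with
  | nil =>
    have : ¬(r > 0 ∧ b < d) := by
      intro ⟨h1, h2⟩; have := h h2; simp at this; omega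
    simp [pvPopPhase, this]
  | cons t rest ih =>
    by_cases hc : r > 0 ∧ t < d
    · simp only [List.cons_append, pvPopPhase, if_pos hc]
      exact ih (r - 1) (by intro hbd; have := h hbd; simp at this ⊢; omega)
    · simp [pvPopPhase, if_neg hc]

-- the loop (foldl over pvStep): same four facts lifted
theorem pvLoop_nopop (xs s : List Int) {r : Int} (h : r ≤ 0) :
    xs.foldl pvStep (s, r) = (xs.reverse ++ s, r) := by
  induction xs generalizing s with
  | nil => simp
  | cons x xs ih =>
    simp only [List.foldl_cons, pvStep, pvPop_nopop s x h]
    rw [ih (x :: s)]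
    simp

theorem pvLoop_budget (xs : List Int) (s : List Int) (r : Int) :
    (xs.foldl pvStep (s, r)).2
      = r - ((s.length : Int) + (xs.length : Int)) + ((xs.foldl pvStep (s, r)).1.length : Int) := by
  induction xs generalizing s r with
  | nil => simp
  | cons x xs ih =>
    simp only [List.foldl_cons, pvStep]
    have hb := pvPop_budget s r x
    have := ih (x :: (pvPopPhase s r x).1) (pvPopPhase s r x).2
    simp only [List.length_cons] at this ⊢
    push_cast at hb this ⊢
    omega

theorem pvLoop_mem (xs : List Int) (s : List Int) (r : Int) :
    ∀ y ∈ (xs.foldl pvStep (s, r)).1, y ∈ s ∨ y ∈ xs := by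
  induction xs generalizing s r with
  | nil => intro y hy; exact Or.inl hy
  | cons x xs ih =>
    intro y hy
    simp only [List.foldl_cons, pvStep] at hy
    rcases ih _ _ y hy with h1 | h2
    · rcases List.mem_cons.mp h1 with h | h
      · exact Or.inr (h ▸ List.mem_cons_self ..)
      · exact Or.inl (pvPop_mem s r x y h)
    · exact Or.inr (List.mem_cons_of_mem _ h2)

theorem pvLoop_bottom (xs : List Int) (s : List Int) (b r : Int)
    (h : ∀ p : Nat, p < xs.length → b < xs.getD p 0 → r ≤ (p : Int) + (s.length : Int)) :
    xs.foldl pvStep (s ++ [b], r)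
      = ((xs.foldl pvStep (s, r)).1 ++ [b], (xs.foldl pvStep (s, r)).2) := by
  induction xs generalizing s r with
  | nil => simp
  | cons x xs ih =>
    have hx : b < x → r ≤ (s.length : Int) := by
      intro hbx
      have := h 0 (by simp) (by simpa using hbx)
      simpa using this
    simp only [List.foldl_cons, pvStep, pvPop_bottom s b r x hx]
    have harr : x :: ((pvPopPhase s r x).1 ++ [b]) = (x :: (pvPopPhase s r x).1) ++ [b] := by simp
    rw [harr, ih (x :: (pvPopPhase s r x).1) (pvPopPhase s r x).2]
    intro p hp hb
    have hb' := pvPop_budget s r x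
    have := h (p + 1) (by simpa using hp) (by simpa using hb)
    simp only [List.length_cons]
    push_cast at this hb' ⊢
    omega

theorem pvLoop_prefix (pre : List Int) (m r : Int) (hall : ∀ y ∈ pre, y < m)
    (hr : (pre.length : Int) ≤ r) :
    (pre ++ [m]).foldl pvStep ([], r) = ([m], r - (pre.length : Int)) := by
  rw [List.foldl_append]
  have hmem : ∀ y ∈ (pre.foldl pvStep ([], r)).1, y < m := by
    intro y hy
    rcases pvLoop_mem pre [] r y hy with h | h
    · simp at h
    · exact hall y h
  have hb := pvLoop_budget pre [] r
  simp only [List.length_nil, Nat.cast_zero, zero_add] at hb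
  have hlen : ((pre.foldl pvStep ([], r)).1.length : Int) ≤ (pre.foldl pvStep ([], r)).2 := by omega
  simp only [List.foldl_cons, List.foldl_nil, pvStep,
    pvPop_drain _ _ _ hmem hlen]
  simp only [Prod.mk.injEq]
  refine ⟨trivial, by omega⟩

-- pvFirstArgmax: the leftmost maximum of a nonempty list
theorem pvArgmax_aux (xs : List Int) (t : Nat) (h1 : 1 ≤ t) (ht : t ≤ xs.length) :
    ∃ i : Nat, (PySem.List.pyRange 1 (t : Int) 1).foldl
        (fun best j => if PySem.List.pyGetD xs j 0 > PySem.List.pyGetD xs best 0 then j else best) 0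
        = (i : Int)
      ∧ i < t ∧ (∀ p, p < i → xs.getD p 0 < xs.getD i 0) ∧ (∀ p, p < t → xs.getD p 0 ≤ xs.getD i 0) := by
  induction t with
  | zero => omega
  | succ t ih =>
    by_cases h0 : t = 0
    · subst h0
      refine ⟨0, ?_, by omega, by omega, by intro p hp; interval_cases p; rfl⟩
      rw [PySem.List.pyRange_one_eq_nil (by norm_num)]
      simp
    · have h1t : 1 ≤ t := by omega
      obtain ⟨i, hfold, hit, hleft, hmax⟩ := ih h1t (by omega)
      have hsplit : PySem.List.pyRange 1 ((t : Int) + 1) 1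
          = PySem.List.pyRange 1 (t : Int) 1 ++ [(t : Int)] :=
        PySem.List.pyRange_one_succ_right (by exact_mod_cast h1t)
      push_cast
      rw [hsplit, List.foldl_append, hfold]
      simp only [List.foldl_cons, List.foldl_nil, PySem.List.pyGetD_natCast]
      by_cases hcmp : xs.getD (t : Int).toNat 0 > xs.getD (i : Int).toNat 0
      · simp only [Int.toNat_natCast] at hcmp ⊢
        rw [if_pos hcmp]
        refine ⟨t, rfl, by omega, ?_, ?_⟩
        · intro p hp
          rcases Nat.lt_or_ge p i with h | h
          · exact lt_trans (hleft p h) hcmp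
          · rcases Nat.eq_or_lt_of_le h with rfl | h'
            · exact hcmp
            · exact lt_of_le_of_lt (hmax p hp) hcmp
        · intro p hp
          rcases Nat.lt_or_ge p t with h | h
          · exact le_of_lt (lt_of_le_of_lt (hmax p h) hcmp)
          · have : p = t := by omega
            subst this; exact le_refl _
      · simp only [Int.toNat_natCast] at hcmp ⊢
        rw [if_neg hcmp]
        refine ⟨i, rfl, by omega, hleft, ?_⟩
        intro p hp
        rcases Nat.lt_or_ge p t with h | h
        · exact hmax p h
        · have : p = t := by omega
          subst this; omega

theorem pvArgmax_spec (xs : List Int) (hne : xs ≠ []) :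
    ∃ i : Nat, pvFirstArgmax xs = (i : Int) ∧ i < xs.length
      ∧ (∀ p, p < i → xs.getD p 0 < xs.getD i 0) ∧ (∀ p, p < xs.length → xs.getD p 0 ≤ xs.getD i 0) := by
  have h1 : 1 ≤ xs.length := List.length_pos_iff.mpr hne
  exact pvArgmax_aux xs xs.length h1 (le_refl _)

-- getD through take / drop
theorem pvGetD_take (xs : List Int) (t p : Nat) (hp : p < t) :
    (xs.take t).getD p 0 = xs.getD p 0 := by
  simp [List.getD_eq_getElem?_getD, hp]

theorem pvGetD_drop (xs : List Int) (t p : Nat) :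
    (xs.drop t).getD p 0 = xs.getD (t + p) 0 := by
  simp [List.getD_eq_getElem?_getD, List.getElem?_drop]

-- the core equivalence: stack algorithm = per-slot selection, for 0 ≤ k ≤ len
theorem pvMain (K : Nat) : ∀ (xs : List Int) (k : Int), 0 ≤ k → k ≤ (xs.length : Int) →
    k.toNat = K →
    (xs.foldl pvStep ([], (xs.length : Int) - k)).1.reverse.take k.toNat = pvSelGo xs k := by
  induction K with
  | zero =>
    intro xs k hk0 _ hK
    have : k = 0 := by omega
    subst this
    rw [pvSelGo]
    simp
  | succ K ih =>
    intro xs k hk0 hkle hK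
    have hkpos : 0 < k := by omega
    set n : Nat := xs.length with hn
    have hn1 : 1 ≤ n := by omega
    set r : Int := (n : Int) - k with hrdef
    have hr0 : 0 ≤ r := by omega
    have hrn : r < (n : Int) := by omega
    -- the window
    have hlim : (n : Int) - k + 1 = r + 1 := by omega
    have hwin : PySem.List.slice xs none (some ((n : Int) - k + 1)) = xs.take (r.toNat + 1) := by
      rw [PySem.List.slice_to xs (show (0:Int) ≤ (n : Int) - k + 1 by omega)]
      congr 1
      omega
    have hwlen : (xs.take (r.toNat + 1)).length = r.toNat + 1 := by
      simp; omega
    have hwne : xs.take (r.toNat + 1) ≠ [] := by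
      intro hcon
      have := hwlen
      rw [hcon] at this
      simp at this
    obtain ⟨i, hfold, hit, hleft, hmax⟩ := pvArgmax_spec _ hwne
    rw [hwlen] at hit
    have hin : i < n := by omega
    set m : Int := xs.getD i 0 with hm
    have hwget : ∀ p, p < r.toNat + 1 → (xs.take (r.toNat + 1)).getD p 0 = xs.getD p 0 :=
      fun p hp => pvGetD_take xs _ p hp
    have hleft' : ∀ p, p < i → xs.getD p 0 < m := by
      intro p hp
      have := hleft p hp
      rwa [hwget p (by omega), hwget i hit] at this
    have hmax' : ∀ p, p < r.toNat + 1 → xs.getD p 0 ≤ m := by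
      intro p hp
      have := hmax p (by omega)
      rwa [hwget p hp, hwget i hit] at this
    -- unfold B one step
    have hselgo : pvSelGo xs k
        = m :: pvSelGo (xs.drop (i + 1)) (k - 1) := by
      rw [pvSelGo, dif_pos hkpos]
      simp only [← hn, hwin, hfold]
      rw [PySem.List.slice_from xs (show (0:Int) ≤ (i : Int) + 1 by omega)]
      have hti : ((i : Int) + 1).toNat = i + 1 := by omega
      rw [hti]
      simp [hm]
    -- decompose A's loop
    have hxs : xs = (xs.take i ++ [m]) ++ xs.drop (i + 1) := by
      conv_lhs => rw [← List.take_append_drop (i + 1) xs]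
      congr 1
      rw [List.take_succ]
      congr 1
      simp [hm, List.getD_eq_getElem?_getD, List.getElem?_eq_getElem hin]
    have htakelen : (xs.take i).length = i := by simp; omega
    have hpre : (xs.take i ++ [m]).foldl pvStep ([], r) = ([m], r - (i : Int)) := by
      have := pvLoop_prefix (xs.take i) m r
        (by
          intro y hy
          obtain ⟨p, hp, hgp⟩ := List.mem_iff_getElem.mp hy
          rw [htakelen] at hp
          have : y = xs.getD p 0 := by
            rw [← hgp, List.getElem_take, List.getD_eq_getElem?_getD,
              List.getElem?_eq_getElem (by omega : p < xs.length)]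
            rfl
          rw [this]
          exact hleft' p hp)
        (by rw [htakelen]; omega)
      rwa [htakelen] at this
    set rest : List Int := xs.drop (i + 1) with hrest
    have hrestlen : (rest.length : Int) = (n : Int) - (i : Int) - 1 := by
      simp [hrest]
      omega
    have hbottom : rest.foldl pvStep ([] ++ [m], r - (i : Int))
        = ((rest.foldl pvStep ([], r - (i : Int))).1 ++ [m],
           (rest.foldl pvStep ([], r - (i : Int))).2) := by
      apply pvLoop_bottom
      intro p hp hbp
      rw [hrest, pvGetD_drop xs (i + 1) p] at hbp
      have hq : i + 1 + p < n := by
        have : (p : Int) < (rest.length : Int) := by exact_mod_cast hp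
        omega
      have hge : ¬ (i + 1 + p < r.toNat + 1) := by
        intro hlt
        have := hmax' (i + 1 + p) hlt
        omega
      simp only [List.length_nil, Nat.cast_zero, add_zero]
      omega
    set S := rest.foldl pvStep ([], r - (i : Int)) with hS
    have hloop : xs.foldl pvStep ([], r) = (S.1 ++ [m], S.2) := by
      conv_lhs => rw [hxs]
      rw [List.foldl_append, hpre]
      simpa using hbottom
    -- assemble
    rw [hrdef] at hloop
    rw [hloop]
    have hktn : k.toNat = K + 1 := hK
    rw [hselgo]
    have hrec : S.1.reverse.take K = pvSelGo rest (k - 1) := by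
      have harg : (rest.length : Int) - (k - 1) = r - (i : Int) := by omega
      have := ih rest (k - 1) (by omega)
        (by omega)
        (by omega)
      rw [harg] at this
      rw [← this]
      congr 1
      omega
    rw [List.reverse_append]
    simp only [List.reverse_singleton, List.singleton_append]
    rw [hktn, List.take_succ_cons, hrec]

-- ===== VERDICT (by name: the statement is the Claim_ definition above) =====
theorem most_joltage_pt2_spec : Claim_equal_most_joltage_pt2 := by
  intro bank k _ hpre
  unfold Spec_most_joltage_pt2 most_joltage_pt2 most_joltage_pt2_alt
  have hk0 : 0 ≤ k := hpre
  by_cases hge : (bank.length : Int) ≤ k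
  · rw [if_pos hge]
    rw [pvLoop_nopop bank [] (by omega : (bank.length : Int) - k ≤ 0)]
    simp only [List.append_nil, List.reverse_reverse]
    rw [PySem.List.slice_to bank hk0]
    exact List.take_of_length_le (by omega)
  · rw [if_neg hge]
    rw [PySem.List.slice_to _ hk0]
    exact pvMain k.toNat bank k hk0 (by omega) rfl
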